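-- pv_equiv track=rewrite | github.com/Alvaropz/Python_problems_BinarySearch | 1. Easy/longest_aliteration/longest_aliteration.py | longest_aliteration
-- ===== SOURCE A (Python) =====
-- def longest_aliteration(words):
--     if len(words) != 0:
--         max_contiguous = 0
--         for index, word_ref in enumerate(words):
--             char = word_ref[0]
--             temp_contigiuous = 1
--             for new_index in range(index+1, len(words)):
--                 if char == words[new_index][0]:
--                     temp_contigiuous += 1
--                 else:
--                     break
--             if temp_contigiuous > max_contiguous:
--                 max_contiguous = temp_contigiuous
--         return max_contiguous
--     return 0
-- ===== SOURCE B (Python) =====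
-- def longest_aliteration(words):
--     best = 0
--     cur = 0
--     prev = None
--     for w in words:
--         c = w[0]
--         cur = cur + 1 if c == prev else 1
--         prev = c
--         if cur > best:
--             best = cur
--     return best
-- ===== Notes on version B (the rewrite author's own statement) =====
-- stated objective: faster
-- what changed: Replaced the nested re-scan from every index by a single pass that tracks the current run length and the maximum seen.
import Mathlib
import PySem

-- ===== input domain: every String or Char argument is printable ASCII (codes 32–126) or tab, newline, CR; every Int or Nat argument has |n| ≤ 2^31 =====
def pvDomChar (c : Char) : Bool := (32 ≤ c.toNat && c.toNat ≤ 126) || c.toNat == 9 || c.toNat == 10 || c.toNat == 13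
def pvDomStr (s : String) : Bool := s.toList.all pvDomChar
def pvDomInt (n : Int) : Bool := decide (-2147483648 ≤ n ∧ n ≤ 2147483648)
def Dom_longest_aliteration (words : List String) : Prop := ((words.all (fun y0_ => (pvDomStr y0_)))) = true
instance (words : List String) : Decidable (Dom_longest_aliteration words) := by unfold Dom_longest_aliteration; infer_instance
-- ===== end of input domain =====

-- B replaces A's quadratic rescan-from-every-index by a single pass tracking the current
-- run length and the maximum (faster, asymptotic).


-- ===== PORT A =====
-- w[0]; exact whenever w ≠ "" (guaranteed by Pre_; on "" Python raises IndexError)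
def pvFirst (w : String) : Char := (PySem.Str.pyGet? w 0).getD ' '

-- the inner 'for new_index in range(index+1, len(words))' loop with its break;
-- words[new_index] via pyGetD (the index is always in range here)
def pvInnerA (c : Char) (words : List String) : List Int → Int → Int
  | [], temp => temp
  | j :: rest, temp =>
    if c = pvFirst (PySem.List.pyGetD words j "") then pvInnerA c words rest (temp + 1)
    else temp

-- the outer 'for index, word_ref in enumerate(words)' loop, accumulator max_contiguous
def pvOuterA (words : List String) : List (Int × String) → Int → Int
  | [], m => m
  | (i, w) :: rest, m =>
    let c := pvFirst w
    let t := pvInnerA c words (PySem.List.pyRange (i + 1) (words.length : Int) 1) 1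
    pvOuterA words rest (if t > m then t else m)

def longest_aliteration (words : List String) : Int :=
  if words.length ≠ 0 then pvOuterA words (PySem.List.enumerate words) 0 else 0

-- ===== PORT B =====
-- single pass: prev = first letter of the previous word, cur = current run, best = max
def pvScanB : List String → Option Char → Int → Int → Int
  | [], _, _, best => best
  | w :: rest, prev, cur, best =>
    let c := pvFirst w
    let cur' := if some c = prev then cur + 1 else 1
    pvScanB rest (some c) cur' (if cur' > best then cur' else best)

def longest_aliteration_alt (words : List String) : Int := pvScanB words none 0 0

-- ===== PRECONDITION & SPEC =====
-- Pre_ excludes lists containing an empty string: there both A and B raise IndexError on w[0].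
def Pre_longest_aliteration (words : List String) : Prop := ∀ w ∈ words, w ≠ ""
instance (words : List String) : Decidable (Pre_longest_aliteration words) := by
  unfold Pre_longest_aliteration; infer_instance
def pvWitness_longest_aliteration : List String := ["ab", "ax", "by"]

def Spec_longest_aliteration (words : List String) (out : Int) : Prop := out = longest_aliteration_alt words
instance (words : List String) (out : Int) : Decidable (Spec_longest_aliteration words out) := by unfold Spec_longest_aliteration; infer_instance

-- ===== CLAIM (what is proved, stated in full; the proofs are below) =====
def Claim_equal_longest_aliteration : Prop := ∀ (words : List String), Dom_longest_aliteration words → Pre_longest_aliteration words → Spec_longest_aliteration words (longest_aliteration words)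

-- ===== LEMMAS AND PROOFS =====

-- length of the run of first letter c at the head of cs
def pvRun (c : Char) (cs : List Char) : Int := ((cs.takeWhile (· == c)).length : Int)

-- A's answer as a clean recursion on the list of first letters
def pvAmax : List Char → Int
  | [] => 0
  | c :: rest => max (1 + pvRun c rest) (pvAmax rest)

-- B's scan on the list of first letters
def pvGoB : List Char → Option Char → Int → Int → Int
  | [], _, _, best => best
  | c :: rest, prev, cur, best =>
    let cur' := if some c = prev then cur + 1 else 1
    pvGoB rest (some c) cur' (if cur' > best then cur' else best)

-- maximum of the cur' values B will produce on cs, starting from state (p, cur)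
def pvK (p : Option Char) (cur : Int) : List Char → Int
  | [] => 0
  | c :: rest =>
    let cur' := if some c = p then cur + 1 else 1
    max cur' (pvK (some c) cur' rest)

theorem pvScanB_eq_goB (ws : List String) (p : Option Char) (cur best : Int) :
    pvScanB ws p cur best = pvGoB (ws.map pvFirst) p cur best := by
  induction ws generalizing p cur best with
  | nil => rfl
  | cons w rest ih => simp [pvScanB, pvGoB, ih]

theorem pvRun_nonneg (c : Char) (cs : List Char) : 0 ≤ pvRun c cs := by
  simp [pvRun]

theorem pvRun_cons (c d : Char) (rest : List Char) :
    pvRun c (d :: rest) = if d = c then 1 + pvRun c rest else 0 := by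
  by_cases h : d = c
  · simp [pvRun, h]; omega
  · simp [pvRun, h]

theorem pvAmax_nonneg (cs : List Char) : 0 ≤ pvAmax cs := by
  induction cs with
  | nil => simp [pvAmax]
  | cons c rest ih => simp [pvAmax]; right; exact ih

theorem pvGoB_eq_max_K (cs : List Char) : ∀ (p : Option Char) (cur best : Int), 0 ≤ best →
    pvGoB cs p cur best = max best (pvK p cur cs) := by
  induction cs with
  | nil => intro p cur best hb; simp [pvGoB, pvK]; omega
  | cons c rest ih =>
    intro p cur best hb
    simp only [pvGoB, pvK]
    rw [ih (some c) _ _ (by omega)]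
    omega

theorem pvK_amax (rest : List Char) : ∀ (c : Char) (cur : Int), 0 ≤ cur →
    max cur (pvK (some c) cur rest) = max (cur + pvRun c rest) (pvAmax rest) := by
  induction rest with
  | nil => intro c cur hc; simp [pvK, pvRun, pvAmax]
  | cons d rest' ih =>
    intro c cur hc
    by_cases h : d = c
    · subst h
      simp [pvK, pvAmax, pvRun_cons]
      have h1 := ih d (cur + 1) (by omega)
      have h2 := ih d 1 (by omega)
      have h3 := pvRun_nonneg d rest'
      omega
    · simp only [pvK, pvAmax, pvRun_cons, Option.some.injEq, if_neg h]
      have h2 := ih d 1 (by omega)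
      have h3 := pvRun_nonneg d rest'
      omega

theorem pvInnerA_eq (words : List String) (c : Char) :
    ∀ (k : Nat) (t : Int), pvInnerA c words (PySem.List.pyRange (k : Int) (words.length : Int) 1) t
      = t + pvRun c ((words.map pvFirst).drop k) := by
  intro k
  induction hn : words.length - k generalizing k with
  | zero =>
    intro t
    have hk : words.length ≤ k := by omega
    rw [PySem.List.pyRange_one_eq_nil (by exact_mod_cast hk)]
    rw [List.drop_eq_nil_of_le (by simpa using hk)]
    simp [pvInnerA, pvRun]
  | succ n ih =>
    intro t
    have hk : k < words.length := by omega
    rw [PySem.List.pyRange_one_cons (by exact_mod_cast hk)]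
    have hdrop : (words.map pvFirst).drop k
        = pvFirst words[k] :: (words.map pvFirst).drop (k + 1) := by
      rw [← List.getElem_cons_drop (by simpa using hk)]
      simp
    simp only [pvInnerA]
    have hget : PySem.List.pyGetD words (k : Int) "" = words[k] := by
      rw [PySem.List.pyGetD_natCast]
      exact List.getD_eq_getElem words "" hk
    rw [hget, hdrop, pvRun_cons]
    by_cases h : c = pvFirst words[k]
    · rw [if_pos h, if_pos h.symm]
      have : ((k : Int) + 1) = ((k + 1 : Nat) : Int) := by push_cast; ring
      rw [this, ih (k + 1) (by omega)]
      ring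
    · rw [if_neg h, if_neg (fun he => h he.symm)]
      ring

theorem pvOuterA_eq (words : List String) :
    ∀ (k : Nat) (m : Int), 0 ≤ m →
      pvOuterA words (PySem.List.enumerate (words.drop k) (k : Int)) m
        = max m (pvAmax ((words.map pvFirst).drop k)) := by
  intro k
  induction hn : words.length - k generalizing k with
  | zero =>
    intro m hm
    rw [List.drop_eq_nil_of_le (show words.length ≤ k by omega),
        List.drop_eq_nil_of_le (show (words.map pvFirst).length ≤ k by
          simpa using (show words.length ≤ k by omega))]
    simp [PySem.List.enumerate, pvOuterA, pvAmax]
    omega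
  | succ n ih =>
    intro m hm
    have hk : k < words.length := by omega
    have hdropw : words.drop k = words[k] :: words.drop (k + 1) :=
      (List.getElem_cons_drop hk).symm
    have hdrop : (words.map pvFirst).drop k
        = pvFirst words[k] :: (words.map pvFirst).drop (k + 1) := by
      rw [← List.getElem_cons_drop (by simpa using hk)]
      simp
    rw [hdropw, PySem.List.enumerate_cons]
    simp only [pvOuterA]
    have hcast : ((k : Int) + 1) = ((k + 1 : Nat) : Int) := by push_cast; ring
    rw [hcast, pvInnerA_eq words _ (k + 1) 1, ih (k + 1) (by omega) _ (by omega)]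
    rw [hdrop]
    simp only [pvAmax]
    have h3 := pvRun_nonneg (pvFirst words[k]) ((words.map pvFirst).drop (k + 1))
    omega

theorem pvK_nonneg_aux (c : Char) (rest : List Char) :
    max 1 (pvK (some c) 1 rest) = max (1 + pvRun c rest) (pvAmax rest) :=
  pvK_amax rest c 1 (by omega)

-- ===== VERDICT (by name: the statement is the Claim_ definition above) =====
theorem longest_aliteration_spec : Claim_equal_longest_aliteration := by
  intro words _ _
  unfold Spec_longest_aliteration longest_aliteration longest_aliteration_alt
  rw [pvScanB_eq_goB]
  cases words with
  | nil => simp [pvGoB]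
  | cons w rest =>
    rw [if_pos (by simp)]
    have hA : pvOuterA (w :: rest) (PySem.List.enumerate (w :: rest)) 0
        = max 0 (pvAmax ((w :: rest).map pvFirst)) := by
      have := pvOuterA_eq (w :: rest) 0 0 (by omega)
      simpa using this
    rw [hA]
    have hB : pvGoB ((w :: rest).map pvFirst) none 0 0
        = max 0 (pvK none 0 ((w :: rest).map pvFirst)) :=
      pvGoB_eq_max_K _ none 0 0 (by omega)
    rw [hB]
    simp only [List.map_cons, pvK, pvAmax]
    rw [if_neg (by simp)]
    have h1 := pvK_nonneg_aux (pvFirst w) (rest.map pvFirst)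
    have h2 := pvAmax_nonneg (rest.map pvFirst)
    have h3 := pvRun_nonneg (pvFirst w) (rest.map pvFirst)
    omega
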